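-- pv_equiv track=rewrite | github.com/m1ttt/FCCToolkit | fastApi/tdv.py | obtener_variables
-- ===== SOURCE A (Python) =====
-- def obtener_variables(cadena):
--     """
--     Esta función recibe una cadena de texto y devuelve una lista ordenada de las variables presentes en la cadena.
--
--     Parámetros:
--     - cadena: una cadena de texto que puede contener variables y otros caracteres.
--
--     Retorna:
--     - Una lista ordenada de las variables presentes en la cadena.
--     """
--     lista_variables = []
--     new_cadena = ""
--     for caracter in cadena:
--         if (
--             caracter.isalpha() and caracter not in lista_variables
--         ) or caracter.isspace():
--             new_cadena += caracter
--         else: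
--             new_cadena += " "
--     new_cadena = list(set(new_cadena.split(" ")))
--     for new in new_cadena:
--         if len(new) == 1:
--             lista_variables.append(new)
--
--     return sorted(lista_variables)
-- ===== SOURCE B (Python) =====
-- def obtener_variables(cadena):
--     """Neighbour-scan re-implementation: a character is a variable iff it is a
--     non-separator (alphabetic, or a whitespace character other than the plain space) standing alone
--     between separators/string ends; collect into a set and sort."""
--     def is_sep(c):
--         return c == ' ' or (not c.isalpha() and not c.isspace())
--     n = len(cadena)
--     variables = set()
--     for i, c in enumerate(cadena):
--         if is_sep(c):
--             continue
--         if (i == 0 or is_sep(cadena[i - 1])) and (i == n - 1 or is_sep(cadena[i + 1])):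
--             variables.add(c)
--     return sorted(variables)
-- ===== Notes on version B (the rewrite author's own statement) =====
-- stated objective: simpler
-- what changed: Replaces A's masked-copy construction + split-on-space + set + length-1 filter pipeline by a single neighbour scan: a character qualifies iff it is a non-separator whose two neighbours (or the string ends) are separators; qualifying characters go into a set that is sorted.
import Mathlib
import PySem

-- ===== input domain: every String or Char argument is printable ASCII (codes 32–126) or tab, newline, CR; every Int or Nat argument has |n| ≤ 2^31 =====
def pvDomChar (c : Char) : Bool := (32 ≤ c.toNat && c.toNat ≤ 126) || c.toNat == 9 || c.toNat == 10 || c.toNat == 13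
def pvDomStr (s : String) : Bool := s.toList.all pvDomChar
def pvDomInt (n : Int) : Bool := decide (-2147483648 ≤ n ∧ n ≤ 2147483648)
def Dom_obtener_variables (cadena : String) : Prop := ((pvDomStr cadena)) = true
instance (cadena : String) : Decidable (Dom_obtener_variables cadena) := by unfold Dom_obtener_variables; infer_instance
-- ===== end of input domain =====

-- B replaces A's masked-copy + split(' ') + set + length-1 filter pipeline by a single
-- neighbour scan collecting isolated non-separator characters into a set (objective: simpler).

-- ===== PORT A =====
def obtener_variables (cadena : String) : List String :=
  let lista_variables : List String := []
  let new_cadena : List Char := cadena.toList.foldl (fun acc c =>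
    if (PySem.Chars.isalpha c && !(lista_variables.contains (String.ofList [c]))) || PySem.Chars.isspace c
      then acc ++ [c] else acc ++ [' ']) []
  let toks : List String := PySem.Set.ofList ((PySem.Chars.splitOn new_cadena [' ']).map String.ofList)
  let lista : List String := toks.foldl (fun acc t => if PySem.Str.len t = 1 then acc ++ [t] else acc) lista_variables
  PySem.List.sorted lista (fun x => x) false

-- ===== PORT B =====
-- is_sep from Source B
def pvIsSep (c : Char) : Bool := c == ' ' || (!(PySem.Chars.isalpha c) && !(PySem.Chars.isspace c))

def obtener_variables_alt (cadena : String) : List String :=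
  let l : List Char := cadena.toList
  let n : Int := l.length
  let vars : PySem.Set String := (PySem.List.enumerate l).foldl (fun acc p =>
    if pvIsSep p.2 then acc
    else if ((p.1 == 0) || pvIsSep (PySem.List.pyGetD l (p.1 - 1) ' ')) &&
            ((p.1 == n - 1) || pvIsSep (PySem.List.pyGetD l (p.1 + 1) ' '))
      then PySem.Set.add acc (String.ofList [p.2]) else acc) PySem.Set.empty
  PySem.List.sorted vars (fun x => x) false

-- ===== PRECONDITION & SPEC =====
def Spec_obtener_variables (cadena : String) (out : List String) : Prop := out = obtener_variables_alt cadena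
instance (cadena : String) (out : List String) : Decidable (Spec_obtener_variables cadena out) := by unfold Spec_obtener_variables; infer_instance

-- ===== CLAIM (what is proved, stated in full; the proofs are below) =====
def Claim_equal_obtener_variables : Prop := ∀ (cadena : String), Dom_obtener_variables cadena → Spec_obtener_variables cadena (obtener_variables cadena)

-- ===== LEMMAS AND PROOFS =====

-- A's per-character mask: keep alphabetic/whitespace characters, blank out the rest.
def pvMask (c : Char) : Char := if pvIsSep c then ' ' else c

-- A's split(" ") result, structurally: tokens between single spaces (spec for the fueled splitOn.go).
def pvTok : List Char → List (List Char)
  | [] => [[]]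
  | c :: rest => if c = ' ' then [] :: pvTok rest else (pvTok rest).modifyHead (c :: ·)

theorem pvMask_eq_space_iff (c : Char) : pvMask c = ' ' ↔ pvIsSep c = true := by
  cases h : pvIsSep c <;> simp [pvMask, h]
  intro hc
  subst hc
  simp [pvIsSep] at h

theorem pvMask_eq_of_not_sep (c : Char) (h : pvIsSep c = false) : pvMask c = c := by
  simp [pvMask, h]

theorem pvMaskA_eq (c : Char) :
    (if (PySem.Chars.isalpha c && !(([] : List String).contains (String.ofList [c]))) || PySem.Chars.isspace c
      then c else ' ') = pvMask c := by
  by_cases hc : c = ' '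
  · subst hc; decide
  · cases ha : PySem.Chars.isalpha c <;> cases hs : PySem.Chars.isspace c <;>
      simp [pvMask, pvIsSep, ha, hs, hc]

theorem pvTok_ne_nil (m : List Char) : pvTok m ≠ [] := by
  induction m with
  | nil => simp [pvTok]
  | cons c rest ih =>
    simp only [pvTok]
    split
    · simp
    · cases h : pvTok rest with
      | nil => exact absurd h ih
      | cons t ts => simp [List.modifyHead]

theorem pvTok_no_space (m : List Char) (t : List Char) (ht : t ∈ pvTok m) : ¬ (' ' ∈ t) := by
  induction m generalizing t with
  | nil => simp [pvTok] at ht; simp [ht]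
  | cons c rest ih =>
    by_cases hc : c = ' '
    · simp only [pvTok, if_pos hc] at ht
      rcases List.mem_cons.1 ht with h | h
      · simp [h]
      · exact ih t h
    · simp only [pvTok, if_neg hc] at ht
      obtain ⟨t0, ts, hts⟩ := List.exists_cons_of_ne_nil (pvTok_ne_nil rest)
      rw [hts, List.modifyHead] at ht
      rcases List.mem_cons.1 ht with h | h
      · subst h
        intro hm
        rcases List.mem_cons.1 hm with h' | h'
        · exact hc h'.symm
        · exact ih t0 (by simp [hts]) h'
      · exact ih t (by simp [hts, h])

theorem pv_go_spec (fuel : Nat) : ∀ (l cur : List Char) (acc : List (List Char)), l.length < fuel →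
    PySem.Chars.splitOn.go [' '] fuel l cur acc
      = acc.reverse ++ (pvTok l).modifyHead (fun t => cur.reverse ++ t) := by
  induction fuel with
  | zero => intro l cur acc h; omega
  | succ fuel ih =>
    intro l cur acc h
    cases l with
    | nil =>
      rw [PySem.Chars.splitOn.go.eq_def]
      simp [pvTok, List.modifyHead]
    | cons c rest =>
      rw [PySem.Chars.splitOn.go.eq_def]
      simp only []
      by_cases hc : c = ' '
      · subst hc
        have hpre : List.isPrefixOf [' '] (' ' :: rest) = true := by
          simp [List.isPrefixOf]
        rw [if_pos hpre]
        simp only [List.length_cons] at h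
        rw [ih _ _ _ (by simpa using Nat.lt_of_succ_lt_succ h)]
        obtain ⟨t0, ts, hts⟩ := List.exists_cons_of_ne_nil (pvTok_ne_nil rest)
        simp [pvTok, hts, List.modifyHead]
      · have hpre : List.isPrefixOf [' '] (c :: rest) = false := by
          simp [List.isPrefixOf]
          exact fun h' => hc h'.symm
        rw [if_neg (by simp [hpre])]
        simp only [List.length_cons] at h
        rw [ih _ _ _ (Nat.lt_of_succ_lt_succ h)]
        obtain ⟨t0, ts, hts⟩ := List.exists_cons_of_ne_nil (pvTok_ne_nil rest)
        simp [pvTok, hts, List.modifyHead, if_neg hc]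

theorem pv_splitOn_space (m : List Char) : PySem.Chars.splitOn m [' '] = pvTok m := by
  unfold PySem.Chars.splitOn
  rw [pv_go_spec (m.length + 1) m [] [] (by omega)]
  obtain ⟨t0, ts, hts⟩ := List.exists_cons_of_ne_nil (pvTok_ne_nil m)
  simp [hts, List.modifyHead]

theorem pv_takeWhile_singleton (m : List Char) (x : Char) (hx : x ≠ ' ') :
    m.takeWhile (fun c => !(c == ' ')) = [x]
      ↔ (0 < m.length ∧ m.getD 0 ' ' = x ∧ (m.length = 1 ∨ m.getD 1 ' ' = ' ')) := by
  match m with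
  | [] => simp
  | [a] =>
    by_cases ha : a = ' '
    · subst ha; simp [List.takeWhile, Ne.symm hx]
    · simp [List.takeWhile, beq_eq_false_iff_ne.2 ha]
  | a :: b :: r =>
    by_cases ha : a = ' '
    · subst ha; simp [List.takeWhile, Ne.symm hx]
    · by_cases hb : b = ' '
      · subst hb; simp [List.takeWhile, beq_eq_false_iff_ne.2 ha]
      · simp [List.takeWhile, beq_eq_false_iff_ne.2 ha, beq_eq_false_iff_ne.2 hb, hb]

theorem pvTok_headI (m : List Char) : (pvTok m).headI = m.takeWhile (fun c => !(c == ' ')) := by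
  induction m with
  | nil => simp [pvTok]
  | cons c rest ih =>
    by_cases hc : c = ' '
    · subst hc; simp [pvTok, List.takeWhile]
    · obtain ⟨t0, ts, hts⟩ := List.exists_cons_of_ne_nil (pvTok_ne_nil rest)
      simp only [pvTok, if_neg hc, hts, List.modifyHead, List.takeWhile]
      simp [beq_eq_false_iff_ne.2 hc, ← ih, hts]

theorem pvTok_tail_mem (m : List Char) (x : Char) (hx : x ≠ ' ') :
    [x] ∈ (pvTok m).tail
      ↔ ∃ j : Nat, j + 1 < m.length ∧ m.getD j ' ' = ' ' ∧ m.getD (j+1) ' ' = x ∧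
          (j + 1 = m.length - 1 ∨ m.getD (j+2) ' ' = ' ') := by
  induction m with
  | nil => simp [pvTok]
  | cons c rest ih =>
    obtain ⟨t0, ts, hts⟩ := List.exists_cons_of_ne_nil (pvTok_ne_nil rest)
    have ht0 : t0 = List.takeWhile (fun c => !(c == ' ')) rest := by
      rw [← pvTok_headI, hts]; rfl
    by_cases hc : c = ' '
    · subst hc
      rw [show pvTok (' '::rest) = [] :: pvTok rest from by simp [pvTok], List.tail_cons]
      constructor
      · intro hmem
        rw [hts] at hmem
        rcases List.mem_cons.1 hmem with h | h
        · obtain ⟨h1, h2, h3⟩ := (pv_takeWhile_singleton rest x hx).1 (by rw [← ht0, ← h])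
          refine ⟨0, by simp; omega, by simp, by simpa using h2, ?_⟩
          rcases h3 with h3 | h3
          · left; simp; omega
          · right; simpa using h3
        · have h' : [x] ∈ (pvTok rest).tail := by rw [hts]; simpa using h
          obtain ⟨j, hj1, hj2, hj3, hj4⟩ := ih.1 h'
          refine ⟨j+1, by simp; omega, by simpa using hj2, by simpa using hj3, ?_⟩
          rcases hj4 with h4 | h4
          · left; simp at h4 ⊢; omega
          · right; simpa using h4
      · rintro ⟨j, hj1, hj2, hj3, hj4⟩
        rw [hts]
        cases j with
        | zero =>
          have hx0 : List.takeWhile (fun c => !(c == ' ')) rest = [x] := by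
            refine (pv_takeWhile_singleton rest x hx).2 ⟨by simp at hj1; omega, by simpa using hj3, ?_⟩
            rcases hj4 with h4 | h4
            · left; simp at h4; omega
            · right; simpa using h4
          exact List.mem_cons.2 (Or.inl (by rw [ht0, hx0]))
        | succ j' =>
          have h' : [x] ∈ (pvTok rest).tail := by
            refine ih.2 ⟨j', by simp at hj1; omega, by simpa using hj2, by simpa using hj3, ?_⟩
            rcases hj4 with h4 | h4
            · left; simp at h4 hj1 ⊢; omega
            · right; simpa using h4
          rw [hts] at h'
          exact List.mem_cons.2 (Or.inr (by simpa using h'))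
    · simp only [pvTok, if_neg hc, hts, List.modifyHead, List.tail_cons]
      have hlhs : [x] ∈ ts ↔ [x] ∈ (pvTok rest).tail := by rw [hts]; rfl
      rw [hlhs, ih]
      constructor
      · rintro ⟨j, hj1, hj2, hj3, hj4⟩
        refine ⟨j+1, by simp; omega, by simpa using hj2, by simpa using hj3, ?_⟩
        rcases hj4 with h4 | h4
        · left; simp at h4 ⊢; omega
        · right; simpa using h4
      · rintro ⟨j, hj1, hj2, hj3, hj4⟩
        cases j with
        | zero => simp at hj2; exact absurd hj2 hc
        | succ j' =>
          refine ⟨j', by simp at hj1; omega, by simpa using hj2, by simpa using hj3, ?_⟩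
          rcases hj4 with h4 | h4
          · left; simp at h4 hj1 ⊢; omega
          · right; simpa using h4

theorem pvTok_singleton_mem (m : List Char) (x : Char) (hx : x ≠ ' ') :
    [x] ∈ pvTok m
      ↔ ∃ i : Nat, i < m.length ∧ m.getD i ' ' = x ∧
          (i = 0 ∨ m.getD (i-1) ' ' = ' ') ∧ (i = m.length - 1 ∨ m.getD (i+1) ' ' = ' ') := by
  obtain ⟨t0, ts, hts⟩ := List.exists_cons_of_ne_nil (pvTok_ne_nil m)
  have ht0 : t0 = List.takeWhile (fun c => !(c == ' ')) m := by
    rw [← pvTok_headI, hts]; rfl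
  have hmem : [x] ∈ pvTok m ↔
      (List.takeWhile (fun c => !(c == ' ')) m = [x]) ∨ [x] ∈ (pvTok m).tail := by
    rw [hts, List.tail_cons, List.mem_cons, ht0]
    constructor
    · rintro (h | h)
      · exact Or.inl h.symm
      · exact Or.inr h
    · rintro (h | h)
      · exact Or.inl h.symm
      · exact Or.inr h
  rw [hmem, pv_takeWhile_singleton m x hx, pvTok_tail_mem m x hx]
  constructor
  · rintro (⟨h1, h2, h3⟩ | ⟨j, hj1, hj2, hj3, hj4⟩)
    · refine ⟨0, h1, h2, Or.inl rfl, ?_⟩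
      rcases h3 with h | h
      · left; omega
      · right; simpa using h
    · exact ⟨j+1, hj1, hj3, Or.inr (by simpa using hj2), hj4⟩
  · rintro ⟨i, hi1, hi2, hi3, hi4⟩
    cases i with
    | zero =>
      left
      refine ⟨hi1, hi2, ?_⟩
      rcases hi4 with h | h
      · left; omega
      · right; exact h
    | succ j =>
      right
      refine ⟨j, hi1, ?_, hi2, hi4⟩
      rcases hi3 with h | h
      · omega
      · simpa using h

-- the common spec: s is an isolated non-separator character of l
def pvQ (l : List Char) (s : String) : Prop :=
  ∃ k : Nat, k < l.length ∧ pvIsSep (l.getD k ' ') = false ∧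
    (k = 0 ∨ pvIsSep (l.getD (k-1) ' ') = true) ∧
    (k = l.length - 1 ∨ pvIsSep (l.getD (k+1) ' ') = true) ∧
    s = String.ofList [l.getD k ' ']

theorem pv_mask_getD (l : List Char) (i : Nat) :
    (l.map pvMask).getD i ' ' = pvMask (l.getD i ' ') := by
  induction l generalizing i with
  | nil => simp [List.getD]; decide
  | cons a l ih =>
    cases i with
    | zero => simp
    | succ n =>
      rw [List.map_cons, List.getD_cons_succ, List.getD_cons_succ]
      exact ih n

theorem pvMask_eq_iff (c x : Char) (hx : x ≠ ' ') :
    pvMask c = x ↔ (pvIsSep c = false ∧ c = x) := by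
  unfold pvMask
  cases h : pvIsSep c
  · simp
  · simp
    exact fun e => absurd e.symm hx

theorem pv_not_sep_ne_space (c : Char) (h : pvIsSep c = false) : c ≠ ' ' := by
  intro hc; subst hc; simp [pvIsSep] at h

theorem pv_mem_foldl_addIf {α : Type} (xs : List α) (s0 : PySem.Set String)
    (f1 f2 : α → Bool) (g : α → String) (y : String) :
    y ∈ xs.foldl (fun acc p => if f1 p then acc else if f2 p then PySem.Set.add acc (g p) else acc) s0
      ↔ y ∈ s0 ∨ ∃ p ∈ xs, f1 p = false ∧ f2 p = true ∧ y = g p := by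
  induction xs generalizing s0 with
  | nil => simp
  | cons a xs ih =>
    simp only [List.foldl_cons]
    by_cases h1 : f1 a = true
    · rw [if_pos h1, ih]
      simp [h1]
    · rw [if_neg h1]
      by_cases h2 : f2 a = true
      · rw [if_pos h2, ih]
        simp only [PySem.Set.mem_add, List.mem_cons]
        constructor
        · rintro ((hy | hy) | ⟨p, hp, hf⟩)
          · exact Or.inl hy
          · exact Or.inr ⟨a, Or.inl rfl, Bool.eq_false_iff.2 h1, h2, hy⟩
          · exact Or.inr ⟨p, Or.inr hp, hf⟩
        · rintro (hy | ⟨p, (rfl | hp), hf1, hf2, hy⟩)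
          · exact Or.inl (Or.inl hy)
          · exact Or.inl (Or.inr hy)
          · exact Or.inr ⟨p, hp, hf1, hf2, hy⟩
      · rw [if_neg h2, ih]
        constructor
        · rintro (hy | ⟨p, hp, hf⟩)
          · exact Or.inl hy
          · exact Or.inr ⟨p, List.mem_cons.2 (Or.inr hp), hf⟩
        · rintro (hy | ⟨p, hp, hf1, hf2, hy⟩)
          · exact Or.inl hy
          · rcases List.mem_cons.1 hp with rfl | hp
            · exact absurd hf2 h2
            · exact Or.inr ⟨p, hp, hf1, hf2, hy⟩

theorem pv_nodup_foldl_addIf {α : Type} (xs : List α) (s0 : PySem.Set String)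
    (f1 f2 : α → Bool) (g : α → String) (h : s0.Nodup) :
    (xs.foldl (fun acc p => if f1 p then acc else if f2 p then PySem.Set.add acc (g p) else acc) s0).Nodup := by
  induction xs generalizing s0 with
  | nil => exact h
  | cons a xs ih =>
    simp only [List.foldl_cons]
    by_cases h1 : f1 a = true
    · rw [if_pos h1]; exact ih _ h
    · rw [if_neg h1]
      by_cases h2 : f2 a = true
      · rw [if_pos h2]; exact ih _ (PySem.Set.nodup_add _ _ h)
      · rw [if_neg h2]; exact ih _ h

def pvLA (l : List Char) : List String :=
  (PySem.Set.ofList ((PySem.Chars.splitOn (l.map pvMask) [' ']).map String.ofList)).filter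
    (fun t => decide (PySem.Str.len t = 1))

def pvLB (l : List Char) : PySem.Set String :=
  (PySem.List.enumerate l).foldl (fun acc p =>
    if pvIsSep p.2 then acc
    else if ((p.1 == 0) || pvIsSep (PySem.List.pyGetD l (p.1 - 1) ' ')) &&
            ((p.1 == (l.length : Int) - 1) || pvIsSep (PySem.List.pyGetD l (p.1 + 1) ' '))
      then PySem.Set.add acc (String.ofList [p.2]) else acc) PySem.Set.empty

theorem pv_A_eq (cadena : String) :
    obtener_variables cadena = PySem.List.sorted (pvLA cadena.toList) (fun x => x) false := by
  simp only [obtener_variables, pvLA]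
  have hstep : (fun (acc : List Char) (c : Char) =>
      if (PySem.Chars.isalpha c && !(([] : List String).contains (String.ofList [c]))) || PySem.Chars.isspace c
        then acc ++ [c] else acc ++ [' ']) = fun acc c => acc ++ [pvMask c] := by
    funext acc c
    rw [← pvMaskA_eq c]
    split_ifs <;> rfl
  rw [hstep, PySem.List.foldl_append_singleton_eq_map, PySem.List.foldl_append_ite_eq_filter]
  simp

theorem pv_B_eq (cadena : String) :
    obtener_variables_alt cadena = PySem.List.sorted (pvLB cadena.toList) (fun x => x) false := by
  rfl

theorem pv_memA (l : List Char) (s : String) : s ∈ pvLA l ↔ pvQ l s := by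
  unfold pvLA
  rw [pv_splitOn_space]
  constructor
  · intro h
    obtain ⟨hmem, hlen⟩ := List.mem_filter.1 h
    obtain ⟨t, ht, rfl⟩ := List.mem_map.1 ((PySem.Set.mem_ofList _ _).1 hmem)
    have hl1 : t.length = 1 := by
      simp [PySem.Str.len] at hlen
      exact_mod_cast hlen
    obtain ⟨x, rfl⟩ := List.length_eq_one_iff.1 hl1
    have hx : x ≠ ' ' := fun e => pvTok_no_space _ [x] ht (by simp [e])
    obtain ⟨i, hi1, hi2, hi3, hi4⟩ := (pvTok_singleton_mem _ x hx).1 ht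
    rw [pv_mask_getD, pvMask_eq_iff _ x hx] at hi2
    refine ⟨i, by simpa using hi1, hi2.1, ?_, ?_, by rw [hi2.2]⟩
    · rcases hi3 with h3 | h3
      · exact Or.inl h3
      · rw [pv_mask_getD, pvMask_eq_space_iff] at h3
        exact Or.inr h3
    · rcases hi4 with h4 | h4
      · exact Or.inl (by simpa using h4)
      · rw [pv_mask_getD, pvMask_eq_space_iff] at h4
        exact Or.inr h4
  · rintro ⟨k, hk, hsep, h1, h2, rfl⟩
    have hx : l.getD k ' ' ≠ ' ' := pv_not_sep_ne_space _ hsep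
    have ht : [l.getD k ' '] ∈ pvTok (l.map pvMask) := by
      refine (pvTok_singleton_mem _ _ hx).2 ⟨k, by simpa using hk, ?_, ?_, ?_⟩
      · rw [pv_mask_getD]; exact pvMask_eq_of_not_sep _ hsep
      · rcases h1 with h | h
        · exact Or.inl h
        · exact Or.inr (by rw [pv_mask_getD, pvMask_eq_space_iff]; exact h)
      · rcases h2 with h | h
        · exact Or.inl (by simpa using h)
        · exact Or.inr (by rw [pv_mask_getD, pvMask_eq_space_iff]; exact h)
    refine List.mem_filter.2 ⟨(PySem.Set.mem_ofList _ _).2 (List.mem_map.2 ⟨_, ht, rfl⟩), ?_⟩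
    simp [PySem.Str.len]

theorem pv_memB (l : List Char) (s : String) : s ∈ pvLB l ↔ pvQ l s := by
  unfold pvLB
  rw [pv_mem_foldl_addIf (PySem.List.enumerate l) PySem.Set.empty
      (fun p => pvIsSep p.2)
      (fun p => ((p.1 == 0) || pvIsSep (PySem.List.pyGetD l (p.1 - 1) ' ')) &&
                ((p.1 == (l.length : Int) - 1) || pvIsSep (PySem.List.pyGetD l (p.1 + 1) ' ')))
      (fun p => String.ofList [p.2]) s]
  have hempty : ¬ s ∈ (PySem.Set.empty : PySem.Set String) := by
    simp [PySem.Set.empty]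
  constructor
  · rintro (h | ⟨p, hp, hf1, hf2, rfl⟩)
    · exact absurd h hempty
    · obtain ⟨k, hk, rfl⟩ := (PySem.List.mem_enumerate_iff l 0 p).1 hp
      simp only [zero_add] at hf1 hf2 ⊢
      simp only [Bool.and_eq_true, Bool.or_eq_true, beq_iff_eq] at hf2
      obtain ⟨hc1, hc2⟩ := hf2
      have hget : l.getD k ' ' = l[k] := List.getD_eq_getElem l ' ' hk
      refine ⟨k, hk, by rw [hget]; exact hf1, ?_, ?_, by rw [hget]⟩
      · by_cases hk0 : k = 0
        · exact Or.inl hk0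
        · rcases hc1 with h | h
          · exact absurd (by exact_mod_cast h) hk0
          · right
            rw [show ((k : Int) - 1) = ((k - 1 : Nat) : Int) by omega, PySem.List.pyGetD_natCast] at h
            exact h
      · by_cases hk1 : k = l.length - 1
        · exact Or.inl hk1
        · rcases hc2 with h | h
          · exact absurd (by omega) hk1
          · right
            rw [show ((k : Int) + 1) = ((k + 1 : Nat) : Int) by omega, PySem.List.pyGetD_natCast] at h
            exact h
  · rintro ⟨k, hk, hsep, h1, h2, rfl⟩
    right
    have hget : l.getD k ' ' = l[k] := List.getD_eq_getElem l ' ' hk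
    refine ⟨((k : Int), l[k]), (PySem.List.mem_enumerate_iff l 0 _).2 ⟨k, hk, by simp⟩, ?_, ?_, by rw [hget]⟩
    · rw [← hget]; exact hsep
    · simp only [Bool.and_eq_true, Bool.or_eq_true, beq_iff_eq]
      constructor
      · by_cases hk0 : k = 0
        · exact Or.inl (by exact_mod_cast hk0)
        · rcases h1 with h | h
          · exact absurd h hk0
          · right
            rw [show ((k : Int) - 1) = ((k - 1 : Nat) : Int) by omega, PySem.List.pyGetD_natCast]
            exact h
      · by_cases hk1 : k = l.length - 1
        · exact Or.inl (by omega)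
        · rcases h2 with h | h
          · exact absurd h hk1
          · right
            rw [show ((k : Int) + 1) = ((k + 1 : Nat) : Int) by omega, PySem.List.pyGetD_natCast]
            exact h

theorem pv_nodupA (l : List Char) : (pvLA l).Nodup := by
  exact (PySem.Set.nodup_ofList _).filter _

theorem pv_nodupB (l : List Char) : (pvLB l).Nodup := by
  exact pv_nodup_foldl_addIf _ _ _ _ _ List.nodup_nil

-- ===== VERDICT (by name: the statement is the Claim_ definition above) =====
theorem obtener_variables_spec : Claim_equal_obtener_variables := by
  intro cadena _hdom
  unfold Spec_obtener_variables
  rw [pv_A_eq, pv_B_eq]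
  exact PySem.List.sorted_eq_sorted_of_perm _ _ _ (fun a b h => h)
    ((List.perm_ext_iff_of_nodup (pv_nodupA _) (pv_nodupB _)).2
      (fun s => (pv_memA _ s).trans (pv_memB _ s).symm))
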